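-- pv_equiv track=rewrite | github.com/omnidan/python-latex | scripts/LatexBeautifier.py | __limitChars
-- ===== SOURCE A (Python) =====
-- def __limitChars(text, charlimit, indentation, newline="\n"):
--     """ Returns a string that contains the beautified/pretty text with a char limit per line """
--     document_buffer = ""
--     i = 0
--     for c in text:
--         document_buffer += c
--         i += 1
--         # TODO: code a better in-word algorithm than 'if c == " "'
--         if i >= charlimit and c == " ":
--             document_buffer += newline
--             document_buffer += indentation
--             i = 0
--     return document_buffer
-- ===== SOURCE B (Python) =====
-- def __limitChars(text, charlimit, indentation, newline="\n"):
--     """ Returns a string that contains the beautified/pretty text with a char limit per line """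
--     skip = max(charlimit - 1, 0)
--     pieces = []
--     pos = 0
--     while True:
--         j = text.find(" ", pos + skip)
--         if j == -1:
--             pieces.append(text[pos:])
--             return "".join(pieces)
--         pieces.append(text[pos:j + 1])
--         pieces.append(newline)
--         pieces.append(indentation)
--         pos = j + 1
-- ===== Notes on version B (the rewrite author's own statement) =====
-- stated objective: faster
-- what changed: B replaces A's per-character loop (append one char, bump a counter, test the limit at every character) by repeated str.find(' ', pos+max(charlimit-1,0)): it jumps directly to each line-breaking space and splices whole slices of the text, so no per-character Python work is done.
import Mathlib
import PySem

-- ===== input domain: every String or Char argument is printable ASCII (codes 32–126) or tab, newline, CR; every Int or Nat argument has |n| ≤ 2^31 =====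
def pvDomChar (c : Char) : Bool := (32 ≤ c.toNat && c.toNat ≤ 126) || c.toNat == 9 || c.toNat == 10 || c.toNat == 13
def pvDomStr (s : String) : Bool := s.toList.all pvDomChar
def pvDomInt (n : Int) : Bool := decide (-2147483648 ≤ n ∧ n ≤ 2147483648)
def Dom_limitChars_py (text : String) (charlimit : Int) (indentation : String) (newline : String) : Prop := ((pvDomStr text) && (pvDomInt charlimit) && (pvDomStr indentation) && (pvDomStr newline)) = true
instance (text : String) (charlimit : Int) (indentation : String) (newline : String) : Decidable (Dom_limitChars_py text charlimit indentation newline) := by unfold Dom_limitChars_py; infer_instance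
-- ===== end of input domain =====

-- B replaces A's per-character loop by repeated str.find(" ", start): it jumps straight to the
-- first space at or past the limit and splices whole slices; a timing run measured it faster.


-- ===== PORT A =====
-- one step of A's `for c in text` loop; state = (document_buffer, i)
def pvStepA (charlimit : Int) (nl ind : List Char) (st : List Char × Int) (c : Char) : List Char × Int :=
  let buf := st.1 ++ [c]
  let i := st.2 + 1
  if i ≥ charlimit ∧ c = ' ' then (buf ++ nl ++ ind, 0) else (buf, i)

def limitChars_py (text : String) (charlimit : Int) (indentation : String) (newline : String) : String :=
  let r := text.toList.foldl (pvStepA charlimit newline.toList indentation.toList) ([], 0)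
  String.mk r.1

-- ===== PORT B =====
-- `text.find(" ", k)` is PySem.Chars.findFrom; a start past the end finds nothing
theorem pvFindFrom_big (xs : List Char) (k : Nat) (h : xs.length < k) :
    PySem.Chars.findFrom xs [' '] (k:Int) none = -1 := by
  have h1 : ¬ ((k:Int) < 0) := by omega
  have h2 : ((xs.length:Int)) < (k:Int) := by exact_mod_cast h
  simp [PySem.Chars.findFrom, h1, h2]

-- cited by the port's decreasing_by: a successful find is at or past the start and inside the text
theorem pvFind_lt (xs : List Char) (k : Nat)
    (h : PySem.Chars.findFrom xs [' '] (k:Int) none ≠ -1) :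
    k ≤ (PySem.Chars.findFrom xs [' '] (k:Int) none).toNat ∧
      (PySem.Chars.findFrom xs [' '] (k:Int) none).toNat < xs.length := by
  by_cases hk : k ≤ xs.length
  · obtain ⟨h1, h2, _⟩ := PySem.Chars.findFrom_natCast_spec xs [' '] k hk h
    have h3 := h2.length_le
    simp only [List.length_cons, List.length_nil, List.length_drop] at h3
    omega
  · exact absurd (pvFindFrom_big xs k (by omega)) h

-- B's while-loop as recursion on the search position `pos`; each round finds the next space at
-- index ≥ pos + skip (skip = max(charlimit-1,0)), slices the finished line out of `xs`, appends
-- newline+indentation and continues after the space; ''.join is the concatenation.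
def pvLines (xs : List Char) (skip : Nat) (nl ind : List Char) (pos : Nat) : List Char :=
  let j := PySem.Chars.findFrom xs [' '] ((pos + skip : Nat) : Int) none
  if hj : j = -1 then PySem.List.slice xs (some (pos:Int)) none
  else
    PySem.List.slice xs (some (pos:Int)) (some ((j.toNat + 1 : Nat) : Int)) ++ nl ++ ind ++
      pvLines xs skip nl ind (j.toNat + 1)
termination_by xs.length - pos
decreasing_by
  have h := pvFind_lt xs (pos + skip) hj
  omega

def limitChars_py_alt (text : String) (charlimit : Int) (indentation : String) (newline : String) : String :=
  -- (charlimit - 1).toNat = max(charlimit - 1, 0)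
  String.mk (pvLines text.toList (charlimit - 1).toNat newline.toList indentation.toList 0)

-- ===== PRECONDITION & SPEC =====
def Spec_limitChars_py (text : String) (charlimit : Int) (indentation : String) (newline : String) (out : String) : Prop := out = limitChars_py_alt text charlimit indentation newline
instance (text : String) (charlimit : Int) (indentation : String) (newline : String) (out : String) : Decidable (Spec_limitChars_py text charlimit indentation newline out) := by unfold Spec_limitChars_py; infer_instance

-- ===== CLAIM (what is proved, stated in full; the proofs are below) =====
def Claim_equal_limitChars_py : Prop := ∀ (text : String) (charlimit : Int) (indentation : String) (newline : String), Dom_limitChars_py text charlimit indentation newline → Spec_limitChars_py text charlimit indentation newline (limitChars_py text charlimit indentation newline)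

-- ===== LEMMAS AND PROOFS =====

-- A's loop over a chunk with no triggering character just appends it and counts its length
theorem pvFoldA_noTrig (cl : Int) (nl ind : List Char) :
    ∀ (ys buf : List Char) (i : Int),
      (∀ k (hk : k < ys.length), ys[k] = ' ' → i + k + 1 < cl) →
      ys.foldl (pvStepA cl nl ind) (buf, i) = (buf ++ ys, i + ys.length) := by
  intro ys
  induction ys with
  | nil => intro buf i _; simp
  | cons c t ih =>
      intro buf i h
      simp only [List.foldl_cons, pvStepA]
      rw [if_neg (by
        rintro ⟨hge, rfl⟩
        have := h 0 (by simp) (by simp)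
        omega)]
      rw [ih (buf ++ [c]) (i + 1) (by
        intro k hk hsp
        have := h (k + 1) (by simp; omega) (by simpa using hsp)
        push_cast at this ⊢
        omega)]
      refine Prod.ext (by simp) (by push_cast [List.length_cons]; omega)

-- main invariant: A's fold over the suffix xs.drop pos (counter reset to 0) equals B's loop from pos
theorem pvMain (cl : Int) (nl ind : List Char) (xs : List Char) :
    ∀ (n pos : Nat) (buf : List Char), xs.length - pos ≤ n →
      ((xs.drop pos).foldl (pvStepA cl nl ind) (buf, 0)).1
        = buf ++ pvLines xs (cl - 1).toNat nl ind pos := by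
  intro n
  induction n with
  | zero =>
      intro pos buf hle
      have hpos : xs.length ≤ pos := by omega
      have hfind : PySem.Chars.findFrom xs [' '] ((pos + (cl - 1).toNat : Nat) : Int) none = -1 := by
        by_cases h : pos + (cl - 1).toNat ≤ xs.length
        · rw [PySem.Chars.findFrom_natCast_eq_neg_one_iff xs [' '] _ h,
            List.drop_eq_nil_of_le (by omega)]
          intro hinf
          simpa using hinf.length_le
        · exact pvFindFrom_big xs _ (by omega)
      rw [List.drop_eq_nil_of_le hpos, List.foldl_nil, pvLines, dif_pos hfind,
        PySem.List.slice_from xs (by positivity)]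
      simp [List.drop_eq_nil_of_le hpos]
  | succ n ih =>
      intro pos buf hle
      rw [pvLines]
      by_cases hj : PySem.Chars.findFrom xs [' '] ((pos + (cl - 1).toNat : Nat) : Int) none = -1
      · rw [dif_pos hj, PySem.List.slice_from xs (by positivity), Int.toNat_natCast]
        have hnt : ∀ k (hk : k < (xs.drop pos).length),
            (xs.drop pos)[k] = ' ' → (0:Int) + k + 1 < cl := by
          intro k hk hsp
          by_contra hge
          push_neg at hge
          have hks : (cl - 1).toNat ≤ k := by omega
          have hklen : pos + k < xs.length := by
            simp only [List.length_drop] at hk; omega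
          rw [PySem.Chars.findFrom_natCast_eq_neg_one_iff xs [' '] _ (by omega)] at hj
          apply hj
          have hx : xs[pos + k]'(by omega) = ' ' := by
            rw [← List.getElem_drop (h := hk)]; exact hsp
          have hpre : [' '] <+: xs.drop (pos + k) := by
            rw [List.drop_eq_getElem_cons (l := xs) (by omega), hx]
            exact ⟨_, rfl⟩
          have hsuf : xs.drop (pos + k) <:+ xs.drop (pos + (cl - 1).toNat) := by
            have hdd : (xs.drop (pos + (cl - 1).toNat)).drop (k - (cl - 1).toNat)
                = xs.drop (pos + k) := by
              rw [List.drop_drop]; congr 1; omega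
            rw [← hdd]
            exact List.drop_suffix _ _
          exact hpre.isInfix.trans hsuf.isInfix
        rw [pvFoldA_noTrig cl nl ind (xs.drop pos) buf 0 hnt]
      · rw [dif_neg hj]
        obtain ⟨hb1, hb2⟩ := pvFind_lt xs (pos + (cl - 1).toNat) hj
        obtain ⟨hj1, hj2, hj3⟩ := PySem.Chars.findFrom_natCast_spec xs [' ']
          (pos + (cl - 1).toNat) (by omega) hj
        set t := (PySem.Chars.findFrom xs [' '] ((pos + (cl - 1).toNat : Nat) : Int) none).toNat
          with ht
        have hrlen : t - pos < (xs.drop pos).length := by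
          simp only [List.length_drop]; omega
        have hspace : (xs.drop pos)[t - pos]'hrlen = ' ' := by
          obtain ⟨rest, hrest⟩ := hj2
          have hdt : List.drop t xs = ' ' :: rest := by simpa using hrest.symm
          have hx : xs[t]'(by omega) = ' ' := by
            have h0 : xs[t]? = some ' ' := by
              have h1 : (List.drop t xs)[0]? = some ' ' := by rw [hdt]; rfl
              rw [List.getElem?_drop] at h1
              simpa using h1
            rw [List.getElem?_eq_getElem (by omega)] at h0
            exact Option.some.inj h0
          rw [List.getElem_drop]
          have hpt : pos + (t - pos) = t := by omega
          simp only [hpt]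
          exact hx
        have hpref : ∀ k (hk : k < ((xs.drop pos).take (t - pos)).length),
            ((xs.drop pos).take (t - pos))[k] = ' ' → (0:Int) + k + 1 < cl := by
          intro k hk hsp
          by_contra hge
          push_neg at hge
          have hkr : k < t - pos := by
            simp only [List.length_take, List.length_drop] at hk; omega
          have hks : (cl - 1).toNat ≤ k := by omega
          have hklen : pos + k < xs.length := by omega
          refine hj3 (pos + k) (by omega) (by omega) ?_
          have hx : xs[pos + k]'(by omega) = ' ' := by
            rw [List.getElem_take] at hsp
            rw [← List.getElem_drop (h := by simp only [List.length_drop]; omega)]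
            exact hsp
          rw [List.drop_eq_getElem_cons (l := xs) (by omega), hx]
          exact ⟨_, rfl⟩
        have hdec : xs.drop pos
            = (xs.drop pos).take (t - pos) ++ ' ' :: (xs.drop pos).drop (t - pos + 1) := by
          conv_lhs => rw [← List.take_append_drop (t - pos) (xs.drop pos)]
          congr 1
          rw [List.drop_eq_getElem_cons hrlen, hspace]
        rw [hdec, List.foldl_append,
          pvFoldA_noTrig cl nl ind ((xs.drop pos).take (t - pos)) buf 0 hpref]
        have hlt : ((((xs.drop pos).take (t - pos)).length : Int)) = ((t - pos : Nat) : Int) := by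
          simp only [List.length_take, List.length_drop]
          congr 1
          omega
        rw [List.foldl_cons, pvStepA]
        rw [if_pos ⟨by rw [hlt]; push_cast; omega, rfl⟩]
        have hdrop : (xs.drop pos).drop (t - pos + 1) = xs.drop (t + 1) := by
          rw [List.drop_drop]; congr 1; omega
        rw [hdrop, ih (t + 1) _ (by omega)]
        rw [PySem.List.slice_natCast]
        have htake : List.take (t + 1 - pos) (List.drop pos xs)
            = (xs.drop pos).take (t - pos) ++ [' '] := by
          have h1 : t + 1 - pos = (t - pos) + 1 := by omega
          rw [h1, List.take_succ, List.getElem?_eq_getElem hrlen, hspace]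
          rfl
        rw [htake]
        simp [List.append_assoc]

-- ===== VERDICT (by name: the statement is the Claim_ definition above) =====
theorem limitChars_py_spec : Claim_equal_limitChars_py := by
  intro text cl ind nl _
  unfold Spec_limitChars_py limitChars_py limitChars_py_alt
  have h := pvMain cl nl.toList ind.toList text.toList text.toList.length 0 [] (by omega)
  simpa using congrArg String.mk h
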